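-- pv_equiv track=rewrite | github.com/rodrigomateosv/practicaexamen1 | ejercicio5.py | hollow_triangle
-- ===== SOURCE A (Python) =====
-- def hollow_triangle(height):
--     #create an empty list to store each line of the triangle
--     triangle = []
--     #iterate from 1 to the value of height+1
--     for i in range(1, height + 1):
--         #if the current iteration is 1 or equal to the value of height
--         if i == 1 or i == height:
--             #append the triangle list with a string of # characters that is 2 times the value of height minus 1
--             triangle.append('#' * (2 * height - 1))
--         else:
--             #otherwise append the triangle list with a string that starts and ends with _ characters
--             #with the number of _ characters being height-i on the left and right
--             #with a # in the middle, followed by _ characters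
--             #with the number of _ characters being 2*i-3
--             triangle.append('_' * (height - i) + '#' + '_' * (2 * i - 3) + '#' + '_' * (height - i))
--     #return the triangle list
--     return triangle
-- ===== SOURCE B (Python) =====
-- def hollow_triangle(height):
--     if height <= 0:
--         return []
--     full = '#' * (2 * height - 1)
--     if height == 1:
--         return [full]
--     base = '_' * (height - 2) + '#' + '_' * (height - 2)
--     rows = [full]
--     for i in range(2, height):
--         left = base[i - 2: i + height - 3]
--         rows.append(left + '_' + left[::-1])
--     rows.append(full)
--     return rows
-- ===== Notes on version B (the rewrite author's own statement) =====
-- stated objective: alternative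
-- what changed: B precomputes one base string '_'*(h-2)+'#'+'_'*(h-2) and produces each interior row as a sliding length-(h-1) window into it (the left half) mirrored around a central '_' (left + '_' + left[::-1]), instead of A's closed-form concatenation of four multiplied '_'/'#' segments per row.
import Mathlib
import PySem

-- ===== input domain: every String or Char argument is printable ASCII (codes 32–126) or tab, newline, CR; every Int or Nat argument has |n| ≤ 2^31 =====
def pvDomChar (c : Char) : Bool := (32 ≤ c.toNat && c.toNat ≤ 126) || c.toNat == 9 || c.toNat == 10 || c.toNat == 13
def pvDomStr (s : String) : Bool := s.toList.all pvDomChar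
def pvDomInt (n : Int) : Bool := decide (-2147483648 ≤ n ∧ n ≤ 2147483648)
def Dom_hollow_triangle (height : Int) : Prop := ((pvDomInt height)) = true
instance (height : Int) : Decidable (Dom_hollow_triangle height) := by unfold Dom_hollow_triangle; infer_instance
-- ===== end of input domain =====

-- B builds each interior row as a sliding window into one precomputed base string,
-- mirrored around a central '_', instead of A's per-row segment concatenation.


-- ===== PORT A =====
def hollow_triangle (height : Int) : List String :=
  (PySem.List.pyRange 1 (height + 1) 1).foldl (fun triangle i =>
    if i == 1 || i == height then
      triangle ++ [String.ofList (List.replicate (2 * height - 1).toNat '#')]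
    else
      triangle ++ [String.ofList (List.replicate (height - i).toNat '_' ++ ['#'] ++
        List.replicate (2 * i - 3).toNat '_' ++ ['#'] ++
        List.replicate (height - i).toNat '_')]) []

-- ===== PORT B =====
def hollow_triangle_alt (height : Int) : List String :=
  if height ≤ 0 then []
  else
    let full := String.ofList (List.replicate (2 * height - 1).toNat '#')
    if height == 1 then [full]
    else
      let base := List.replicate (height - 2).toNat '_' ++ ['#'] ++
                  List.replicate (height - 2).toNat '_'
      ([full] ++ (PySem.List.pyRange 2 height 1).map (fun i =>
        let left := PySem.List.slice base (some (i - 2)) (some (i + height - 3))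
        String.ofList (left ++ ['_'] ++ left.reverse))) ++ [full]

-- ===== PRECONDITION & SPEC =====
def Spec_hollow_triangle (height : Int) (out : List String) : Prop := out = hollow_triangle_alt height
instance (height : Int) (out : List String) : Decidable (Spec_hollow_triangle height out) := by unfold Spec_hollow_triangle; infer_instance

-- ===== CLAIM =====
def Claim_equal_hollow_triangle : Prop := ∀ (height : Int), Dom_hollow_triangle height → Spec_hollow_triangle height (hollow_triangle height)

-- ===== LEMMAS AND PROOFS =====

-- a fold whose both branches append a singleton is a map
theorem pv_foldl_append_map (c : Int → Bool) (f g : Int → String) (l : List Int) (acc : List String) :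
    l.foldl (fun a i => if c i then a ++ [f i] else a ++ [g i]) acc
      = acc ++ l.map (fun i => if c i then f i else g i) := by
  induction l generalizing acc with
  | nil => simp
  | cons x xs ih =>
    rw [List.foldl_cons, ih]
    by_cases h : c x = true <;> simp [h]

-- the sliding window into the base string is the left half of row i
theorem pv_left (h i : Int) (h2 : 2 ≤ i) (hi : i ≤ h - 1) :
    PySem.List.slice (List.replicate (h - 2).toNat '_' ++ ['#'] ++
        List.replicate (h - 2).toNat '_') (some (i - 2)) (some (i + h - 3))
      = List.replicate (h - i).toNat '_' ++ ['#'] ++ List.replicate (i - 2).toNat '_' := by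
  have e1 : i - 2 = (((i - 2).toNat : Nat) : Int) := by omega
  have e2 : i + h - 3 = (((i + h - 3).toNat : Nat) : Int) := by omega
  rw [e1, e2, PySem.List.slice_natCast]
  apply List.ext_getElem
  · simp [List.length_take, List.length_drop]; omega
  · intro n h1' h2'
    simp only [List.length_take, List.length_drop, List.length_append,
      List.length_replicate, List.length_cons, List.length_nil] at h1'
    simp only [List.getElem_take, List.getElem_drop, List.getElem_append,
      List.getElem_cons, List.getElem_replicate, List.length_replicate,
      List.length_append, List.length_cons, List.length_nil] at *
    split_ifs <;> first | rfl | omega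

-- mirroring the left half around a central '_' gives A's segment row
theorem pv_mirror (a b : Nat) :
    (List.replicate a '_' ++ ['#'] ++ List.replicate b '_') ++ ['_'] ++
      (List.replicate a '_' ++ ['#'] ++ List.replicate b '_').reverse
    = List.replicate a '_' ++ ['#'] ++ List.replicate (b + 1 + b) '_' ++ ['#'] ++
      List.replicate a '_' := by
  simp [List.reverse_append, List.replicate_add, List.append_assoc]

-- ===== VERDICT =====
theorem hollow_triangle_spec : Claim_equal_hollow_triangle := by
  intro height _
  unfold Spec_hollow_triangle hollow_triangle hollow_triangle_alt
  by_cases h0 : height ≤ 0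
  · rw [PySem.List.pyRange_one_eq_nil (by omega)]
    simp [h0]
  · by_cases h1 : height = 1
    · subst h1
      rw [PySem.List.pyRange_one_singleton]
      simp
    · have hb0 : ¬ height ≤ 0 := h0
      have hne : (height == 1) = false := by simp [h1]
      simp only [hb0, if_false, hne, Bool.false_eq_true]
      have h2 : (2 : Int) ≤ height := by omega
      rw [pv_foldl_append_map (fun i => i == 1 || i == height)
        (fun _ => String.ofList (List.replicate (2 * height - 1).toNat '#'))
        (fun i => String.ofList (List.replicate (height - i).toNat '_' ++ ['#'] ++
            List.replicate (2 * i - 3).toNat '_' ++ ['#'] ++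
            List.replicate (height - i).toNat '_'))]
      rw [PySem.List.pyRange_one_append 1 2 (height + 1) (by omega) (by omega),
          PySem.List.pyRange_one_append 2 height (height + 1) (by omega) (by omega),
          PySem.List.pyRange_one_singleton,
          show PySem.List.pyRange 1 2 1 = [1] from by decide]
      simp only [List.map_append, List.map_cons, List.map_nil, List.nil_append,
        List.append_assoc]
      have hc1 : ((1 : Int) == 1 || (1 : Int) == height) = true := by simp
      have hch : ((height : Int) == 1 || (height : Int) == height) = true := by simp
      rw [if_pos hc1, if_pos hch]
      congr 1
      congr 1
      apply List.map_congr_left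
      intro i hi
      rw [PySem.List.mem_pyRange_one] at hi
      obtain ⟨hi2, hih⟩ := hi
      have hne1 : (i == 1) = false := by simp; omega
      have hneh : (i == height) = false := by simp; omega
      simp only [hne1, hneh, Bool.or_self, Bool.false_eq_true, if_false,
        ← List.append_assoc]
      rw [pv_left height i hi2 (by omega), pv_mirror,
        show (i - 2).toNat + 1 + (i - 2).toNat = (2 * i - 3).toNat from by omega]
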